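-- pv_equiv track=rewrite | github.com/AviralGup7/Singularity-Zero | src/analysis/active/xss_context_engine.py | _char_overlap_score
-- ===== SOURCE A (Python) =====
-- def _char_overlap_score(s1: str, s2: str) -> int:
--     """Approximate fuzzywuzzy.partial_ratio."""
--     if not s1 or not s2:
--         return 0
--
--     shorter = s1 if len(s1) < len(s2) else s2
--     longer = s2 if len(s1) < len(s2) else s1
--     len_shorter = len(shorter)
--
--     if len_shorter == 0:
--         return 0
--
--     best = 0
--     for i in range(len(longer) - len_shorter + 1):
--         substring = longer[i : i + len_shorter]
--         matches = sum(1 for a, b in zip(substring, shorter) if a == b)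
--         best = max(best, matches)
--
--     return int((best / len_shorter) * 100)
-- ===== SOURCE B (Python) =====
-- def _bisect_left(a, x):
--     lo, hi = 0, len(a)
--     while lo < hi:
--         mid = (lo + hi) // 2
--         if a[mid] < x:
--             lo = mid + 1
--         else:
--             hi = mid
--     return lo
--
--
-- def _bisect_right(a, x):
--     lo, hi = 0, len(a)
--     while lo < hi:
--         mid = (lo + hi) // 2
--         if a[mid] <= x:
--             lo = mid + 1
--         else:
--             hi = mid
--     return lo
--
--
-- def _char_overlap_score(s1: str, s2: str) -> int:
--     """Approximate fuzzywuzzy.partial_ratio (index-then-bucket reimplementation)."""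
--     if not s1 or not s2:
--         return 0
--
--     shorter, longer = (s1, s2) if len(s1) < len(s2) else (s2, s1)
--     ls = len(shorter)
--     max_off = len(longer) - ls
--
--     # pass 1: index the longer string: char -> sorted list of its positions
--     pos = {}
--     for i, c in enumerate(longer):
--         pos.setdefault(c, []).append(i)
--
--     # pass 2: bucket each matching pair by its alignment offset; binary search
--     # narrows each position list to the window of in-range offsets [j, j + max_off]
--     counts = [0] * (max_off + 1)
--     for j, c in enumerate(shorter):
--         hits = pos.get(c, [])
--         for i in hits[_bisect_left(hits, j):_bisect_right(hits, j + max_off)]: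
--             counts[i - j] += 1
--
--     best = max(counts)
--     return int((best / ls) * 100)
-- ===== Notes on version B (the rewrite author's own statement) =====
-- stated objective: alternative
-- what changed: Replaces A's per-offset substring slicing and zip-scan with a two-pass index-then-bucket algorithm: build a dict mapping each character of the longer string to its sorted position list, then for each character of the shorter string binary-search the window of in-range positions and bucket each matching pair by its alignment offset into a counts array whose max gives the score.
import Mathlib
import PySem

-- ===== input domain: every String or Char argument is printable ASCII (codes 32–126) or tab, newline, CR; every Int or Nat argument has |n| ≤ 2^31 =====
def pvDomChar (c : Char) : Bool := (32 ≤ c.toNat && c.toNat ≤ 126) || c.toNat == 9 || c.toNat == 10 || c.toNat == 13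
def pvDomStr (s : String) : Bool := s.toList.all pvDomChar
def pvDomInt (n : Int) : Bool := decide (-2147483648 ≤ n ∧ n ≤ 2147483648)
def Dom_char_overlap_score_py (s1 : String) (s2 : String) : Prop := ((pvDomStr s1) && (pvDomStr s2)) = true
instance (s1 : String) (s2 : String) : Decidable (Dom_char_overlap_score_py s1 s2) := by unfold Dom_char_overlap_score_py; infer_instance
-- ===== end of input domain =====

-- B replaces A's per-offset substring scan by an index of the longer string's character
-- positions plus one bucketing pass over the binary-searched window of in-range matching
-- pairs (a different algorithm of similar cost); both ports share pvFloatScore, an exact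
-- model of CPython's `int((best / len_shorter) * 100)` double arithmetic
-- (round-to-nearest-even, 53-bit significand).

-- ===== PORT A =====
-- shared helper: exact IEEE-754 binary64 model of `int((k / n) * 100)` for 0 ≤ k ≤ n.
-- pvShiftLoop normalises a/b into [2^52, 2^53) by doublings (fuel 400 covers |a|,|b| < 2^170,
-- far beyond the 2^31 domain bound); pvRound rounds a positive rational to the nearest
-- double, ties to even; pvFloatScore composes the two roundings of `k / n * 100` and
-- truncates (the value is ≥ 0, so truncation is the floor).
def pvShiftLoop : Nat → Nat → Nat → Int → Nat × Nat × Int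
  | 0, a, b, s => (a, b, s)
  | fuel+1, a, b, s =>
    if a < 2^52 * b then pvShiftLoop fuel (2*a) b (s+1)
    else if 2^53 * b ≤ a then pvShiftLoop fuel a (2*b) (s-1)
    else (a, b, s)

def pvRound (x : ℚ) : ℚ :=
  if x ≤ 0 then 0 else
  let t := pvShiftLoop 400 x.num.toNat x.den 0
  let a := t.1
  let b := t.2.1
  let s := t.2.2
  let m0 := a / b
  let r := a % b
  let m : Nat := if 2*r < b then m0 else if b < 2*r then m0 + 1
                 else if m0 % 2 = 0 then m0 else m0 + 1
  (m : ℚ) * (2:ℚ)^(-s)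

def pvFloatScore (best : Int) (lenShorter : Int) : Int :=
  ⌊ pvRound (pvRound ((best : ℚ) / (lenShorter : ℚ)) * 100) ⌋

-- A's offset loop: for each start i, slice the longer string and count equal zipped chars
def pvBestA (lon : List Char) (sho : List Char) : Int :=
  (PySem.List.pyRange 0 (PySem.List.len lon - PySem.List.len sho + 1) 1).foldl
    (fun best i =>
      let substring := PySem.List.slice lon (some i) (some (i + PySem.List.len sho))
      let mtc := (substring.zip sho).foldl
        (fun acc p => if p.1 == p.2 then acc + 1 else acc) (0 : Int)
      max best mtc) 0

def char_overlap_score_py (s1 : String) (s2 : String) : Int :=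
  if PySem.Str.len s1 = 0 ∨ PySem.Str.len s2 = 0 then 0
  else
    let shorter := if PySem.Str.len s1 < PySem.Str.len s2 then s1 else s2
    let longer := if PySem.Str.len s1 < PySem.Str.len s2 then s2 else s1
    let lenShorter := PySem.Str.len shorter
    if lenShorter = 0 then 0
    else pvFloatScore (pvBestA longer.toList shorter.toList) lenShorter

-- ===== PORT B =====
-- hand-written binary searches (Source B defines its own: A imports no modules)
def pvBisectLeftLoop (a : List Int) (x : Int) : Nat → Nat → Nat
  | lo, hi =>
    if h : lo < hi then
      if PySem.List.pyGetD a (((lo + hi) / 2 : Nat) : Int) 0 < x then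
        pvBisectLeftLoop a x ((lo + hi) / 2 + 1) hi
      else
        pvBisectLeftLoop a x lo ((lo + hi) / 2)
    else lo
termination_by lo hi => hi - lo
decreasing_by all_goals omega

def pvBisectRightLoop (a : List Int) (x : Int) : Nat → Nat → Nat
  | lo, hi =>
    if h : lo < hi then
      if PySem.List.pyGetD a (((lo + hi) / 2 : Nat) : Int) 0 ≤ x then
        pvBisectRightLoop a x ((lo + hi) / 2 + 1) hi
      else
        pvBisectRightLoop a x lo ((lo + hi) / 2)
    else lo
termination_by lo hi => hi - lo
decreasing_by all_goals omega

def pvBisectLeft (a : List Int) (x : Int) : Nat := pvBisectLeftLoop a x 0 a.length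
def pvBisectRight (a : List Int) (x : Int) : Nat := pvBisectRightLoop a x 0 a.length

-- pass 1: pos = {c: sorted list of positions of c in longer}  (setdefault(c, []).append(i))
def pvPos (lon : List Char) : PySem.Dict Char (List Int) :=
  (PySem.List.enumerate lon 0).foldl
    (fun d p => d.modify p.2 [] (fun xs => xs ++ [p.1])) PySem.Dict.empty

-- pass 2: bucket each matching pair by its offset; the bisected window [j, j+max_off]
-- restricts each position list to the offsets that are in range
def pvCounts (lon : List Char) (sho : List Char) : List Int :=
  (PySem.List.enumerate sho 0).foldl
    (fun cs q =>
      let hits := (pvPos lon).getD q.2 []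
      (PySem.List.slice hits
        (some ((pvBisectLeft hits q.1 : Nat) : Int))
        (some ((pvBisectRight hits (q.1 + (PySem.List.len lon - PySem.List.len sho)) : Nat) : Int))).foldl
        (fun cs i => PySem.List.pySetD cs (i - q.1) (PySem.List.pyGetD cs (i - q.1) 0 + 1))
        cs)
    (PySem.List.pyRepeat [(0 : Int)] (PySem.List.len lon - PySem.List.len sho + 1))

def char_overlap_score_py_alt
 (s1 : String) (s2 : String) : Int :=
  if PySem.Str.len s1 = 0 ∨ PySem.Str.len s2 = 0 then 0
  else
    let shorter := if PySem.Str.len s1 < PySem.Str.len s2 then s1 else s2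
    let longer := if PySem.Str.len s1 < PySem.Str.len s2 then s2 else s1
    let ls := PySem.Str.len shorter
    let best := (PySem.List.max? (pvCounts longer.toList shorter.toList) (fun x => x)).getD 0
    pvFloatScore best ls

-- ===== PRECONDITION & SPEC =====
def Spec_char_overlap_score_py (s1 : String) (s2 : String) (out : Int) : Prop := out = char_overlap_score_py_alt s1 s2
instance (s1 : String) (s2 : String) (out : Int) : Decidable (Spec_char_overlap_score_py s1 s2 out) := by unfold Spec_char_overlap_score_py; infer_instance

-- ===== CLAIM (what is proved, stated in full; the proofs are below) =====
def Claim_equal_char_overlap_score_py : Prop := ∀ (s1 : String) (s2 : String), Dom_char_overlap_score_py s1 s2 → Spec_char_overlap_score_py s1 s2 (char_overlap_score_py s1 s2)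

-- ===== LEMMAS AND PROOFS =====

def pvMcnt (lon : List Char) (sho : List Char) (k : Nat) : Nat :=
  (List.range sho.length).countP (fun t => lon[k+t]? == sho[t]?)

-- positions of c in lon, as B's pos dict stores them

def pvPosList (lon : List Char) (c : Char) : List Int :=
  ((PySem.List.enumerate lon 0).filter (fun p => p.2 == c)).map (fun p => p.1)

theorem pvPos_getD (lon : List Char) (c : Char) :
    (pvPos lon).getD c [] = pvPosList lon c := by
  unfold pvPos pvPosList
  have h := List.foldl_map (f := fun p : Int × Char => (p.2, p.1))
    (g := fun (d : PySem.Dict Char (List Int)) (q : Char × Int) => d.modify q.1 [] (fun xs => xs ++ [q.2]))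
    (l := PySem.List.enumerate lon 0) (init := PySem.Dict.empty)
  simp only [] at h
  rw [← h, PySem.Dict.getD_foldl_modify_append]
  simp [List.filter_map, List.map_map, Function.comp_def]

theorem pvPosList_count (lon : List Char) (c : Char) (a : Nat) :
    (pvPosList lon c).count ((a : Int)) = (if lon[a]? == some c then 1 else 0) := by
  have hpw : ((PySem.List.enumerate lon 0).filter (fun p => p.2 == c)).Pairwise (fun p q => p.1 < q.1) :=
    (PySem.List.pairwise_lt_enumerate lon 0).sublist List.filter_sublist
  have hnd : (pvPosList lon c).Nodup := by
    unfold pvPosList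
    exact (hpw.map _ (fun p q h => by omega)).nodup
  have hmem : (a : Int) ∈ pvPosList lon c ↔ (lon[a]? == some c) = true := by
    unfold pvPosList
    simp only [List.mem_map, List.mem_filter, PySem.List.mem_enumerate_iff]
    constructor
    · rintro ⟨p, ⟨⟨k, hk, rfl⟩, hc⟩, hfst⟩
      simp at hc hfst
      have : k = a := by omega
      subst this
      simp [List.getElem?_eq_getElem hk, hc]
    · intro h
      by_cases ha : a < lon.length
      · refine ⟨((a : Int), lon[a]), ⟨⟨a, ha, by simp⟩, ?_⟩, rfl⟩
        simp [List.getElem?_eq_getElem ha] at h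
        simpa using h
      · rw [List.getElem?_eq_none (by omega)] at h
        simp at h
  by_cases h : (lon[a]? == some c) = true
  · rw [if_pos h, List.count_eq_one_of_mem hnd (hmem.mpr h)]
  · rw [if_neg h, List.count_eq_zero_of_not_mem]
    intro hm; exact h (hmem.mp hm)

theorem pvPosList_sorted (lon : List Char) (c : Char) : (pvPosList lon c).Pairwise (· < ·) := by
  unfold pvPosList
  rw [List.pairwise_map]
  exact (PySem.List.pairwise_lt_enumerate lon 0).sublist List.filter_sublist

theorem pvBisectLeftLoop_spec (a : List Int) (x : Int) (hsort : a.Pairwise (· < ·)) :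
    ∀ lo hi, lo ≤ hi → hi ≤ a.length →
      (∀ k (hk : k < a.length), k < lo → a[k] < x) →
      (∀ k (hk : k < a.length), hi ≤ k → x ≤ a[k]) →
      pvBisectLeftLoop a x lo hi ≤ a.length ∧
      (∀ k (hk : k < a.length), k < pvBisectLeftLoop a x lo hi → a[k] < x) ∧
      (∀ k (hk : k < a.length), pvBisectLeftLoop a x lo hi ≤ k → x ≤ a[k]) := by
  intro lo hi
  induction lo, hi using pvBisectLeftLoop.induct a x with
  | case1 lo hi h hlt ih =>
    intro hlohi hhi hbelow habove
    rw [pvBisectLeftLoop, dif_pos h, if_pos hlt]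
    have hmidlen : (lo + hi) / 2 < a.length := by omega
    rw [PySem.List.pyGetD_natCast, List.getD_eq_getElem _ _ hmidlen] at hlt
    apply ih (by omega) hhi
    · intro k hk hkmid
      rcases Nat.lt_or_ge k ((lo + hi) / 2) with hc | hc
      · calc a[k] < a[(lo + hi) / 2] := List.pairwise_iff_getElem.mp hsort k _ hk hmidlen hc
          _ < x := hlt
      · have : k = (lo + hi) / 2 := by omega
        subst this; exact hlt
    · exact habove
  | case2 lo hi h hlt ih =>
    intro hlohi hhi hbelow habove
    rw [pvBisectLeftLoop, dif_pos h, if_neg hlt]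
    have hmidlen : (lo + hi) / 2 < a.length := by omega
    rw [PySem.List.pyGetD_natCast, List.getD_eq_getElem _ _ hmidlen] at hlt
    push_neg at hlt
    apply ih (by omega) (by omega) hbelow
    intro k hk hkmid
    rcases Nat.lt_or_ge k ((lo + hi) / 2) with hc | hc
    · omega
    · rcases Nat.eq_or_lt_of_le hc with hc' | hc'
      · subst hc'; exact hlt
      · calc x ≤ a[(lo + hi) / 2] := hlt
          _ ≤ a[k] := le_of_lt (List.pairwise_iff_getElem.mp hsort _ k hmidlen hk hc')
  | case3 lo hi h =>
    intro hlohi hhi hbelow habove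
    rw [pvBisectLeftLoop, dif_neg h]
    exact ⟨by omega, fun k hk hklo => hbelow k hk (by omega), fun k hk hlok => habove k hk (by omega)⟩

theorem pvBisectRightLoop_spec (a : List Int) (x : Int) (hsort : a.Pairwise (· < ·)) :
    ∀ lo hi, lo ≤ hi → hi ≤ a.length →
      (∀ k (hk : k < a.length), k < lo → a[k] ≤ x) →
      (∀ k (hk : k < a.length), hi ≤ k → x < a[k]) →
      pvBisectRightLoop a x lo hi ≤ a.length ∧
      (∀ k (hk : k < a.length), k < pvBisectRightLoop a x lo hi → a[k] ≤ x) ∧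
      (∀ k (hk : k < a.length), pvBisectRightLoop a x lo hi ≤ k → x < a[k]) := by
  intro lo hi
  induction lo, hi using pvBisectRightLoop.induct a x with
  | case1 lo hi h hlt ih =>
    intro hlohi hhi hbelow habove
    rw [pvBisectRightLoop, dif_pos h, if_pos hlt]
    have hmidlen : (lo + hi) / 2 < a.length := by omega
    rw [PySem.List.pyGetD_natCast, List.getD_eq_getElem _ _ hmidlen] at hlt
    apply ih (by omega) hhi
    · intro k hk hkmid
      rcases Nat.lt_or_ge k ((lo + hi) / 2) with hc | hc
      · exact le_of_lt (lt_of_lt_of_le (List.pairwise_iff_getElem.mp hsort k _ hk hmidlen hc) hlt)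
      · have : k = (lo + hi) / 2 := by omega
        subst this; exact hlt
    · exact habove
  | case2 lo hi h hlt ih =>
    intro hlohi hhi hbelow habove
    rw [pvBisectRightLoop, dif_pos h, if_neg hlt]
    have hmidlen : (lo + hi) / 2 < a.length := by omega
    rw [PySem.List.pyGetD_natCast, List.getD_eq_getElem _ _ hmidlen] at hlt
    push_neg at hlt
    apply ih (by omega) (by omega) hbelow
    intro k hk hkmid
    rcases Nat.lt_or_ge k ((lo + hi) / 2) with hc | hc
    · omega
    · rcases Nat.eq_or_lt_of_le hc with hc' | hc'
      · subst hc'; exact hlt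
      · calc x < a[(lo + hi) / 2] := hlt
          _ ≤ a[k] := le_of_lt (List.pairwise_iff_getElem.mp hsort _ k hmidlen hk hc')
  | case3 lo hi h =>
    intro hlohi hhi hbelow habove
    rw [pvBisectRightLoop, dif_neg h]
    exact ⟨by omega, fun k hk hklo => hbelow k hk (by omega), fun k hk hlok => habove k hk (by omega)⟩

-- the bisected window keeps every occurrence of an in-range value, and only indices ≥ j
theorem pv_window (a : List Int) (hsort : a.Pairwise (· < ·)) (j bnd : Int) :
    (∀ i ∈ PySem.List.slice a (some ((pvBisectLeft a j : Nat) : Int)) (some ((pvBisectRight a bnd : Nat) : Int)), j ≤ i) ∧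
    (∀ v : Int, j ≤ v → v ≤ bnd →
      (PySem.List.slice a (some ((pvBisectLeft a j : Nat) : Int)) (some ((pvBisectRight a bnd : Nat) : Int))).count v = a.count v) := by
  obtain ⟨hl1, hl2, hl3⟩ := pvBisectLeftLoop_spec a j hsort 0 a.length (by omega) le_rfl
    (by intro k hk h; omega) (by intro k hk h; omega)
  obtain ⟨hr1, hr2, hr3⟩ := pvBisectRightLoop_spec a bnd hsort 0 a.length (by omega) le_rfl
    (by intro k hk h; omega) (by intro k hk h; omega)
  set l := pvBisectLeftLoop a j 0 a.length with hldef
  set r := pvBisectRightLoop a bnd 0 a.length with hrdef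
  have hslice : PySem.List.slice a (some ((pvBisectLeft a j : Nat) : Int)) (some ((pvBisectRight a bnd : Nat) : Int)) =
      (a.drop l).take (r - l) := by
    unfold pvBisectLeft pvBisectRight
    rw [← hldef, ← hrdef, PySem.List.slice_natCast]
  rw [hslice]
  constructor
  · intro i hi
    have hi' := List.mem_of_mem_take hi
    obtain ⟨m, hm, he⟩ := List.mem_iff_getElem.mp hi'
    rw [List.getElem_drop] at he
    have : l + m < a.length := by
      have := List.length_drop (l := a) (i := l) ▸ hm
      omega
    rw [← he]
    exact hl3 (l + m) this (by omega)
  · intro v hjv hvb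
    have hlr : l ≤ r := by
      by_contra hcon
      push_neg at hcon
      have hrlen : r < a.length := by omega
      have h1 := hl2 r hrlen hcon
      have h2 := hr3 r hrlen le_rfl
      omega
    have hsplit1 : a = a.take l ++ a.drop l := (List.take_append_drop l a).symm
    have hsplit2 : a.drop l = (a.drop l).take (r - l) ++ (a.drop l).drop (r - l) := (List.take_append_drop (r - l) (a.drop l)).symm
    have hdd : (a.drop l).drop (r - l) = a.drop r := by
      rw [List.drop_drop]
      congr 1
      omega
    have hcount1 : (a.take l).count v = 0 := by
      rw [List.count_eq_zero]
      intro hmem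
      obtain ⟨m, hm, he⟩ := List.mem_iff_getElem.mp hmem
      rw [List.getElem_take] at he
      have hmlen : m < a.length := by
        have := List.length_take_le l a
        omega
      have := hl2 m hmlen (by simp at hm; omega)
      omega
    have hcount2 : (a.drop r).count v = 0 := by
      rw [List.count_eq_zero]
      intro hmem
      obtain ⟨m, hm, he⟩ := List.mem_iff_getElem.mp hmem
      rw [List.getElem_drop] at he
      have hmlen : r + m < a.length := by
        have := List.length_drop (l := a) (i := r) ▸ hm
        omega
      have := hr3 (r + m) hmlen (by omega)
      omega
    conv_rhs => rw [hsplit1]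
    rw [List.count_append, hcount1]
    conv_rhs => rw [hsplit2]
    rw [hdd, List.count_append, hcount2]
    omega

-- effect of B's inner bucketing loop on one cell of counts
theorem pv_inner (N : Nat) (I : List Int) (j : Int) (hmem : ∀ i ∈ I, j ≤ i) :
    ∀ (cs : List Int), cs.length = N + 1 →
      (I.foldl (fun cs i =>
          PySem.List.pySetD cs (i - j) (PySem.List.pyGetD cs (i - j) 0 + 1)) cs).length = N + 1 ∧
      ∀ a : Nat, a ≤ N →
        PySem.List.pyGetD (I.foldl (fun cs i =>
            PySem.List.pySetD cs (i - j) (PySem.List.pyGetD cs (i - j) 0 + 1)) cs) (a : Int) 0 =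
          PySem.List.pyGetD cs (a : Int) 0 + I.count ((a : Int) + j) := by
  induction I with
  | nil => intro cs hlen; exact ⟨hlen, fun a _ => by simp⟩
  | cons i I ih =>
    intro cs hlen
    have hij : j ≤ i := hmem i (by simp)
    have hmem' : ∀ i ∈ I, j ≤ i := fun x hx => hmem x (by simp [hx])
    simp only [List.foldl_cons]
    set v := PySem.List.pyGetD cs (i - j) 0 + 1 with hv
    by_cases hin : i - j < ((N : Int) + 1)
    · have hset : PySem.List.pySetD cs (i - j) v = cs.set (i - j).toNat v :=
        PySem.List.pySetD_of_nonneg cs v (by omega)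
      have hlen' : (PySem.List.pySetD cs (i - j) v).length = N + 1 := by
        rw [hset, List.length_set, hlen]
      obtain ⟨h1, h2⟩ := ih hmem' _ hlen'
      refine ⟨h1, fun a ha => ?_⟩
      rw [h2 a ha]
      by_cases heq : i = (a : Int) + j
      · have hia : (i - j).toNat = a := by omega
        have hcount : (i :: I).count ((a : Int) + j) = I.count ((a : Int) + j) + 1 := by
          rw [List.count_cons]; simp [heq]
        rw [hcount, hset, hia]
        have hget : PySem.List.pyGetD (cs.set a v) (a : Int) 0 = v := by
          rw [PySem.List.pyGetD_natCast]
          rw [List.getD_eq_getElem?_getD, List.getElem?_set_self (by omega)]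
          simp
        rw [hget, hv]
        have : PySem.List.pyGetD cs (i - j) 0 = PySem.List.pyGetD cs (a : Int) 0 := by
          rw [show i - j = (a : Int) by omega]
        rw [this]; push_cast; ring
      · have hia : (i - j).toNat ≠ a := by omega
        have hcount : (i :: I).count ((a : Int) + j) = I.count ((a : Int) + j) := by
          rw [List.count_cons]; simp [heq]
        rw [hcount, hset]
        have hget : PySem.List.pyGetD (cs.set (i - j).toNat v) (a : Int) 0 =
            PySem.List.pyGetD cs (a : Int) 0 := by
          rw [PySem.List.pyGetD_natCast, PySem.List.pyGetD_natCast]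
          rw [List.getD_eq_getElem?_getD, List.getD_eq_getElem?_getD,
            List.getElem?_set_ne (by omega)]
        rw [hget]
    · have hnone : PySem.List.pySet? cs (i - j) v = none := by
        rw [PySem.List.pySet?_eq_none_iff]
        intro hr
        have : -(cs.length : Int) ≤ i - j ∧ i - j < cs.length := hr
        omega
      have hid : PySem.List.pySetD cs (i - j) v = cs := by
        unfold PySem.List.pySetD
        rw [hnone]
        rfl
      rw [hid]
      obtain ⟨h1, h2⟩ := ih hmem' _ hlen
      refine ⟨h1, fun a ha => ?_⟩
      rw [h2 a ha]
      have : i ≠ (a : Int) + j := by omega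
      rw [List.count_cons]; simp [this]

-- effect of B's outer loop: cell a accumulates the match count at offset a
theorem pv_outer (lon : List Char) (N : Nat) :
    ∀ (sh : List Char) (s : Nat) (cs : List Int), cs.length = N + 1 →
      ((PySem.List.enumerate sh (s : Int)).foldl
        (fun cs q =>
          (PySem.List.slice ((pvPos lon).getD q.2 [])
            (some ((pvBisectLeft ((pvPos lon).getD q.2 []) q.1 : Nat) : Int))
            (some ((pvBisectRight ((pvPos lon).getD q.2 []) (q.1 + (N : Int)) : Nat) : Int))).foldl
            (fun cs i => PySem.List.pySetD cs (i - q.1) (PySem.List.pyGetD cs (i - q.1) 0 + 1)) cs)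
        cs).length = N + 1 ∧
      ∀ a : Nat, a ≤ N →
        PySem.List.pyGetD ((PySem.List.enumerate sh (s : Int)).foldl
          (fun cs q =>
            (PySem.List.slice ((pvPos lon).getD q.2 [])
              (some ((pvBisectLeft ((pvPos lon).getD q.2 []) q.1 : Nat) : Int))
              (some ((pvBisectRight ((pvPos lon).getD q.2 []) (q.1 + (N : Int)) : Nat) : Int))).foldl
              (fun cs i => PySem.List.pySetD cs (i - q.1) (PySem.List.pyGetD cs (i - q.1) 0 + 1)) cs)
          cs) (a : Int) 0 =
        PySem.List.pyGetD cs (a : Int) 0 +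
          ((List.range sh.length).countP (fun t => lon[a+s+t]? == sh[t]?) : Int) := by
  intro sh
  induction sh with
  | nil => intro s cs hlen; exact ⟨hlen, fun a _ => by simp [PySem.List.enumerate]⟩
  | cons c rest ih =>
    intro s cs hlen
    rw [PySem.List.enumerate_cons]
    simp only [List.foldl_cons]
    rw [pvPos_getD]
    obtain ⟨hwin1, hwin2⟩ := pv_window (pvPosList lon c) (pvPosList_sorted lon c) ((s : Int)) ((s : Int) + (N : Int))
    obtain ⟨hl1, hg1⟩ := pv_inner N
      (PySem.List.slice (pvPosList lon c)
        (some ((pvBisectLeft (pvPosList lon c) ((s : Int)) : Nat) : Int))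
        (some ((pvBisectRight (pvPosList lon c) ((s : Int) + (N : Int)) : Nat) : Int)))
      ((s : Int)) hwin1 cs hlen
    have hs1 : ((s : Int) + 1) = ((s + 1 : Nat) : Int) := by push_cast; ring
    obtain ⟨hl2, hg2⟩ := ih (s + 1) _ hl1
    rw [hs1]
    refine ⟨hl2, fun a ha => ?_⟩
    rw [hg2 a ha, hg1 a ha]
    have hcnt : (PySem.List.slice (pvPosList lon c)
        (some ((pvBisectLeft (pvPosList lon c) ((s : Int)) : Nat) : Int))
        (some ((pvBisectRight (pvPosList lon c) ((s : Int) + (N : Int)) : Nat) : Int))).count ((a : Int) + (s : Int)) =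
        (if lon[a+s]? == some c then 1 else 0) := by
      rw [hwin2 ((a : Int) + (s : Int)) (by omega) (by omega)]
      rw [show ((a : Int) + (s : Int)) = ((a + s : Nat) : Int) by push_cast; ring]
      exact pvPosList_count lon c (a + s)
    rw [hcnt]
    rw [List.length_cons, List.range_succ_eq_map, List.countP_cons, List.countP_map]
    have hpred : (List.range rest.length).countP
          ((fun t => lon[a+s+t]? == (c :: rest)[t]?) ∘ Nat.succ) =
        (List.range rest.length).countP (fun t => lon[a+(s+1)+t]? == rest[t]?) := by
      apply List.countP_congr
      intro t _
      simp only [Function.comp_apply, List.getElem?_cons_succ]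
      rw [show a + s + (t + 1) = a + (s + 1) + t by omega]
    rw [hpred]
    simp only [List.getElem?_cons_zero, Nat.add_zero]
    push_cast
    ring

theorem pv_counts_getD (lon sho : List Char) (hle : sho.length ≤ lon.length) :
    (pvCounts lon sho).length = (lon.length - sho.length) + 1 ∧
    ∀ a : Nat, a ≤ lon.length - sho.length →
      PySem.List.pyGetD (pvCounts lon sho) (a : Int) 0 = (pvMcnt lon sho a : Int) := by
  set N := lon.length - sho.length with hN
  have hNI : PySem.List.len lon - PySem.List.len sho = (N : Int) := by
    simp only [PySem.List.len_eq]; omega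
  have hinit : PySem.List.pyRepeat [(0 : Int)] ((N : Int) + 1) = List.replicate (N + 1) (0 : Int) := by
    rw [PySem.List.pyRepeat_singleton, show ((N : Int) + 1).toNat = N + 1 from by omega]
  unfold pvCounts
  simp only [hNI, hinit]
  obtain ⟨h1, h2⟩ := pv_outer lon N sho 0 (List.replicate (N + 1) (0 : Int)) (by simp)
  rw [show ((0 : Nat) : Int) = (0 : Int) by simp] at h1 h2
  refine ⟨h1, fun a ha => ?_⟩
  rw [h2 a ha]
  have : PySem.List.pyGetD (List.replicate (N + 1) (0 : Int)) (a : Int) 0 = 0 := by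
    rw [PySem.List.pyGetD_natCast, List.getD_eq_getElem?_getD]
    rcases Nat.lt_or_ge a (N+1) with h | h
    · simp [h]
    · rw [List.getElem?_eq_none (by simpa using h)]; rfl
  rw [this]
  simp only [pvMcnt, Nat.add_zero, zero_add]

theorem pv_counts_eq_map (lon sho : List Char) (hle : sho.length ≤ lon.length) :
    pvCounts lon sho =
      (List.range (lon.length - sho.length + 1)).map (fun k => (pvMcnt lon sho k : Int)) := by
  obtain ⟨hlen, hget⟩ := pv_counts_getD lon sho hle
  apply List.ext_getElem
  · simp [hlen]
  · intro a h1 h2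
    have ha : a ≤ lon.length - sho.length := by rw [hlen] at h1; omega
    have := hget a ha
    rw [PySem.List.pyGetD_natCast, List.getD_eq_getElem _ _ h1] at this
    rw [this]
    simp [List.getElem_map, List.getElem_range]

-- A's zip-count over the slice is the same match count

-- A's zip-count over the slice is the same match count
theorem pv_zipcnt (sho : List Char) : ∀ (lon : List Char) (k : Nat), k + sho.length ≤ lon.length →
    (((lon.drop k).take sho.length).zip sho).countP (fun p => p.1 == p.2) = pvMcnt lon sho k := by
  induction sho with
  | nil => intro lon k h; simp [pvMcnt]
  | cons c rest ih =>
    intro lon k h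
    have hk : k < lon.length := by simp at h; omega
    rw [List.drop_eq_getElem_cons hk]
    simp only [List.length_cons, List.take_succ_cons, List.zip_cons_cons, List.countP_cons]
    have h2 : (k+1) + rest.length ≤ lon.length := by simp at h ⊢; omega
    have hrec := ih lon (k+1) h2
    rw [hrec]
    simp only [pvMcnt, List.length_cons, List.range_succ_eq_map, List.countP_cons, List.countP_map]
    have hpred : (List.range rest.length).countP ((fun t => lon[k+t]? == (c :: rest)[t]?) ∘ Nat.succ)
        = (List.range rest.length).countP (fun t => lon[(k+1)+t]? == rest[t]?) := by
      apply List.countP_congr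
      intro t _
      simp only [Function.comp_apply, List.getElem?_cons_succ]
      rw [show k + (t+1) = (k+1)+t by omega]
    rw [hpred]
    simp only [List.getElem?_cons_zero, Nat.add_zero, List.getElem?_eq_getElem hk]
    simp

theorem pv_max_getD (xs : List Int) (h : ∀ x ∈ xs, 0 ≤ x) :
    (PySem.List.max? xs (fun x => x)).getD 0 = xs.foldl max 0 := by
  cases xs with
  | nil => simp [PySem.List.max?]
  | cons x t =>
    rw [PySem.List.max?_id_cons]
    simp only [Option.getD_some, List.foldl_cons]
    have hx : max 0 x = x := by
      have := h x (by simp)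
      omega
    rw [hx]

theorem pv_main (lon sho : List Char) (hle : sho.length ≤ lon.length) :
    pvBestA lon sho = (PySem.List.max? (pvCounts lon sho) (fun x => x)).getD 0 := by
  rw [pv_counts_eq_map lon sho hle]
  rw [pv_max_getD _ (by intro x hx; simp at hx; obtain ⟨k, _, rfl⟩ := hx; positivity)]
  rw [List.foldl_map]
  unfold pvBestA
  have hb : PySem.List.len lon - PySem.List.len sho + 1 = ((lon.length - sho.length : Nat) : Int) + 1 := by
    simp only [PySem.List.len_eq]; omega
  rw [hb, PySem.List.pyRange_one,
    show (((lon.length - sho.length : Nat) : Int) + 1 - 0).toNat = lon.length - sho.length + 1 by omega,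
    List.foldl_map]
  apply PySem.List.foldl_congr_mem
  intro best k hk
  simp only []
  have hkls : k + sho.length ≤ lon.length := by
    simp only [List.mem_range] at hk; omega
  congr 1
  have hslice : PySem.List.slice lon (some ((0 : Int) + (k : Int))) (some ((0 : Int) + (k : Int) + PySem.List.len sho)) =
      (lon.drop k).take sho.length := by
    simp only [zero_add, PySem.List.len_eq]
    exact PySem.List.slice_natCast_add lon k sho.length
  rw [hslice]
  rw [PySem.List.foldl_if_add_one]
  rw [pv_zipcnt sho lon k hkls]
  simp

-- ===== VERDICT (by name: the statement is the Claim_ definition above) =====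

-- ===== VERDICT (by name: the statement is the Claim_ definition above) =====
theorem char_overlap_score_py_spec : Claim_equal_char_overlap_score_py := by
  intro s1 s2 _
  unfold Spec_char_overlap_score_py char_overlap_score_py char_overlap_score_py_alt
  by_cases hz : PySem.Str.len s1 = 0 ∨ PySem.Str.len s2 = 0
  · rw [if_pos hz, if_pos hz]
  · simp only [if_neg hz]
    obtain ⟨hz1, hz2⟩ := not_or.mp hz
    by_cases hlt : PySem.Str.len s1 < PySem.Str.len s2
    · simp only [if_pos hlt, if_neg hz1]
      have hle : s1.toList.length ≤ s2.toList.length := by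
        simp only [PySem.Str.len_eq] at hlt
        exact_mod_cast le_of_lt hlt
      rw [pv_main s2.toList s1.toList hle]
    · simp only [if_neg hlt, if_neg hz2]
      have hle : s2.toList.length ≤ s1.toList.length := by
        simp only [PySem.Str.len_eq] at hlt
        exact_mod_cast not_lt.mp hlt
      rw [pv_main s1.toList s2.toList hle]
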